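-- pv_equiv track=rewrite | github.com/yostrou/python_exercises | get_performers.py | stars
-- ===== SOURCE A (Python) =====
-- def stars(movies, tvshows):
--     """
--     Takes in two dictionaries, `movies` and `tvshows`, which contains values of
--     names of performers. Returns a new dictionary with the performers' names as the keys,
--     and the movies and TV shows as the values, sorted alphabetically.
--     """
--     new_dict = {}
--
--     for (movie, actors) in movies.items():
--         for actor in actors:
--             if actor in new_dict:
--                 new_dict[actor].append(movie)
--             else:
--                 new_dict[actor] = [movie]
--     for (tv_show, performers) in tvshows.items():
--         for performer in performers:
--             if performer in new_dict:
--                 new_dict[performer].append(tv_show)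
--             else:
--                 new_dict[performer] = [tv_show]
--     for value in new_dict.values():
--         value.sort()
--
--     return new_dict
-- ===== SOURCE B (Python) =====
-- def stars(movies, tvshows):
--     """Invert title->performers dicts into performer->sorted titles.
--
--     Different algorithm: flatten both dicts into one (performer, title) pair
--     list, sort it by performer, cut it into runs of equal performers (sorting
--     each run's titles), then emit the groups in first-encounter key order.
--     """
--     raw = [(p, title) for d in (movies, tvshows)
--            for title, ps in d.items() for p in ps]
--     pairs = sorted(raw, key=lambda q: q[0])
--     groups = {}
--     i, n = 0, len(pairs)
--     while i < n:
--         j = i + 1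
--         while j < n and pairs[j][0] == pairs[i][0]:
--             j += 1
--         groups[pairs[i][0]] = sorted(t for _, t in pairs[i:j])
--         i = j
--     return {p: groups[p] for p in dict.fromkeys(p for p, _ in raw)}
-- ===== Notes on version B (the rewrite author's own statement) =====
-- stated objective: alternative
-- what changed: B flattens both dicts into one (performer, title) pair list, sorts it by performer, cuts the sorted list into runs of equal performers (sorting each run's titles), and emits the groups in first-encounter key order, replacing A's incremental insert-or-append dict mutation followed by an in-place sort pass over every value.
import Mathlib
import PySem

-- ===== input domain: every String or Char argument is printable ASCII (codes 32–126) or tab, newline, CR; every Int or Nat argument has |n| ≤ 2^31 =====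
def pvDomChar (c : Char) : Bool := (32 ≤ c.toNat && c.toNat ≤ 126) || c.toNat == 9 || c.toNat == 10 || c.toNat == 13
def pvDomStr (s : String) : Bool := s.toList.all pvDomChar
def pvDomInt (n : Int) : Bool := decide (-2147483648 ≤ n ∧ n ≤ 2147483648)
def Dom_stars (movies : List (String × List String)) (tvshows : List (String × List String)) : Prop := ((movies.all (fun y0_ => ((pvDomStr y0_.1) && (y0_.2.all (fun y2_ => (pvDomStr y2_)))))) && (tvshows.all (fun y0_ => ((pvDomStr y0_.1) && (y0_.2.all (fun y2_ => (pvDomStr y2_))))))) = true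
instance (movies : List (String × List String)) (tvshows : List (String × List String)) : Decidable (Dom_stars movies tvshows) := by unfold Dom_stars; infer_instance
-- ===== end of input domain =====

-- B flattens both dicts into one (performer, title) pair list, sorts it by performer and cuts it
-- into runs (sorting each run's titles), instead of A's incremental insert-or-append dict mutation
-- followed by an in-place sort pass (alternative algorithm, not claimed faster).


-- ===== PORT A =====
-- one title's worth of A's inner loop: 'for actor in actors: if actor in new_dict: … else: …'
def starsInner (title : String) (actors : List String) (d : PySem.Dict String (List String)) :
    PySem.Dict String (List String) :=
  actors.foldl
    (fun d actor =>
      if d.contains actor then d.modify actor [] (fun v => v ++ [title])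
      else d.insert actor [title]) d

def stars (movies : List (String × List String)) (tvshows : List (String × List String)) : List (String × List String) :=
  let d1 := movies.foldl (fun d e => starsInner e.1 e.2 d) PySem.Dict.empty
  let d2 := tvshows.foldl (fun d e => starsInner e.1 e.2 d) d1
  -- 'for value in new_dict.values(): value.sort()' then return the dict (as its items)
  d2.items.map (fun kv => (kv.1, PySem.List.sorted kv.2 (fun x => x) false))

-- ===== PORT B =====
-- Source B's index scan over the performer-sorted pair list: each step cuts off one run of equal
-- performers (the inner 'while j < n and pairs[j][0] == pairs[i][0]') and sorts its titles
def starsRuns : List (String × String) → List (String × List String)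
  | [] => []
  | q :: rest =>
      (q.1, PySem.List.sorted (q.2 :: (rest.takeWhile (fun r => r.1 == q.1)).map Prod.snd)
              (fun x => x) false)
        :: starsRuns (rest.dropWhile (fun r => r.1 == q.1))
  termination_by l => l.length
  decreasing_by simpa using Nat.lt_succ_of_le (List.length_dropWhile_le _ _)

def stars_alt (movies : List (String × List String)) (tvshows : List (String × List String)) : List (String × List String) :=
  let raw := movies.flatMap (fun e => e.2.map (fun p => (p, e.1)))
             ++ tvshows.flatMap (fun e => e.2.map (fun p => (p, e.1)))
  let pairs := PySem.List.sorted raw Prod.fst false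
  let groups := PySem.Dict.ofList (starsRuns pairs)
  -- 'groups[p]' always hits: every first-encounter performer heads some run of `pairs`
  (PySem.List.dedup (raw.map Prod.fst)).map (fun k => (k, groups.getD k []))

-- ===== PRECONDITION & SPEC =====
def Spec_stars (movies : List (String × List String)) (tvshows : List (String × List String)) (out : List (String × List String)) : Prop := out = stars_alt movies tvshows
instance (movies : List (String × List String)) (tvshows : List (String × List String)) (out : List (String × List String)) : Decidable (Spec_stars movies tvshows out) := by unfold Spec_stars; infer_instance

-- ===== CLAIM (what is proved, stated in full; the proofs are below) =====
def Claim_equal_stars : Prop := ∀ (movies : List (String × List String)) (tvshows : List (String × List String)), Dom_stars movies tvshows → Spec_stars movies tvshows (stars movies tvshows)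

-- ===== LEMMAS AND PROOFS =====

-- A's if/else step is exactly the 'modify with default []' step
theorem starsStep_eq_modify (d : PySem.Dict String (List String)) (a t : String) :
    (if d.contains a then d.modify a [] (fun v => v ++ [t]) else d.insert a [t])
      = d.modify a [] (fun v => v ++ [t]) := by
  by_cases h : d.contains a
  · simp [h]
  · simp [h, PySem.Dict.modify, PySem.Dict.getD_of_not_contains]

-- A's inner loop over actors is the flat modify-loop over that title's (actor, title) pairs
theorem starsInner_eq_foldl_pairs (title : String) (actors : List String)
    (d : PySem.Dict String (List String)) :
    starsInner title actors d
      = (actors.map (fun p => (p, title))).foldl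
          (fun d q => d.modify q.1 [] (fun v => v ++ [q.2])) d := by
  unfold starsInner
  rw [List.foldl_map]
  apply PySem.List.foldl_congr_mem
  intro d a _
  exact starsStep_eq_modify d a title

-- the whole outer loop over one dict is the flat modify-loop over its flatMapped pairs
theorem starsOuter_eq_foldl_pairs (l : List (String × List String))
    (d : PySem.Dict String (List String)) :
    l.foldl (fun d e => starsInner e.1 e.2 d) d
      = (l.flatMap (fun e => e.2.map (fun p => (p, e.1)))).foldl
          (fun d q => d.modify q.1 [] (fun v => v ++ [q.2])) d := by
  induction l generalizing d with
  | nil => rfl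
  | cons e rest ih =>
      simp only [List.foldl_cons, List.flatMap_cons, List.foldl_append]
      rw [starsInner_eq_foldl_pairs, ih]

-- A's result, in closed form: first-encounter keys, each with its sorted filtered titles
theorem stars_eq_canon (movies tvshows : List (String × List String)) :
    stars movies tvshows =
      (PySem.List.dedup (((movies.flatMap (fun e => e.2.map (fun p => (p, e.1)))
                           ++ tvshows.flatMap (fun e => e.2.map (fun p => (p, e.1)))).map Prod.fst))).map
        (fun k => (k, PySem.List.sorted
            (((movies.flatMap (fun e => e.2.map (fun p => (p, e.1)))
               ++ tvshows.flatMap (fun e => e.2.map (fun p => (p, e.1)))).filter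
                 (fun q => q.1 == k)).map Prod.snd) (fun x => x) false)) := by
  unfold stars
  simp only [starsOuter_eq_foldl_pairs, ← List.foldl_append]
  set pairs := movies.flatMap (fun e => e.2.map (fun p => (p, e.1)))
               ++ tvshows.flatMap (fun e => e.2.map (fun p => (p, e.1))) with hp
  set D := pairs.foldl (fun d q => d.modify q.1 [] (fun v => v ++ [q.2]))
             (PySem.Dict.empty : PySem.Dict String (List String)) with hD
  have hnd : D.keys.Nodup := by
    rw [hD]
    exact PySem.Dict.nodup_keys_foldl_modify_key pairs Prod.fst []
      (fun d q v => v ++ [q.2]) PySem.Dict.empty (by simp)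
  have hkeys : D.keys = PySem.List.dedup (pairs.map Prod.fst) := by
    rw [hD, PySem.Dict.keys_foldl_modify_key]
    simp [PySem.Set.update, PySem.Set.ofList_eq_foldl, PySem.Dict.keys_empty]
  rw [PySem.Dict.items_eq_map_keys D hnd [], hkeys, List.map_map]
  refine List.map_congr_left (fun k _ => ?_)
  simp only [Function.comp, hD, PySem.Dict.getD_foldl_modify_append, PySem.Dict.getD_empty,
    List.nil_append]

-- keys appearing after a dropped run are strictly larger than the run's key
theorem dropWhile_keys_gt (p : String) (l : List (String × String))
    (hl : l.Pairwise (fun a b => a.1 ≤ b.1)) (hge : ∀ r ∈ l, p ≤ r.1) :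
    ∀ r ∈ l.dropWhile (fun r => r.1 == p), p < r.1 := by
  induction l with
  | nil => simp
  | cons a t ih =>
      by_cases h : a.1 = p
      · rw [List.dropWhile_cons_of_pos (by simp [h])]
        exact ih hl.of_cons (fun r hr => hge r (List.mem_cons_of_mem _ hr))
      · rw [List.dropWhile_cons_of_neg (by simp [h])]
        intro r hr
        rcases List.mem_cons.mp hr with rfl | hr
        · exact lt_of_le_of_ne (hge r (List.mem_cons_self)) (fun e => h e.symm)
        · exact lt_of_lt_of_le
            (lt_of_le_of_ne (hge a List.mem_cons_self) (fun e => h e.symm))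
            ((List.pairwise_cons.mp hl).1 r hr)

-- every key of the run list comes from the pair list
theorem mem_fst_starsRuns (l : List (String × String)) (k : String)
    (hk : k ∈ (starsRuns l).map Prod.fst) : k ∈ l.map Prod.fst := by
  induction l using starsRuns.induct with
  | case1 => simp [starsRuns] at hk
  | case2 q rest ih =>
      rw [starsRuns] at hk
      simp only [List.map_cons, List.mem_cons] at hk
      rcases hk with rfl | hk
      · simp
      · simp only [List.map_cons, List.mem_cons]
        exact Or.inr (((List.dropWhile_sublist _).map Prod.fst).mem (ih hk))

-- on a key-sorted pair list the run keys are distinct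
theorem nodup_fst_starsRuns (l : List (String × String))
    (hl : l.Pairwise (fun a b => a.1 ≤ b.1)) :
    ((starsRuns l).map Prod.fst).Nodup := by
  induction l using starsRuns.induct with
  | case1 => simp [starsRuns]
  | case2 q rest ih =>
      rw [starsRuns]
      have hgt : ∀ r ∈ rest.dropWhile (fun r => r.1 == q.1), q.1 < r.1 :=
        dropWhile_keys_gt q.1 rest hl.of_cons (fun r hr => (List.pairwise_cons.mp hl).1 r hr)
      have hdrop : (rest.dropWhile (fun r => r.1 == q.1)).Pairwise (fun a b => a.1 ≤ b.1) :=
        hl.of_cons.sublist (List.dropWhile_sublist _)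
      simp only [List.map_cons, List.nodup_cons]
      refine ⟨fun h => ?_, ih hdrop⟩
      rcases List.mem_map.mp (mem_fst_starsRuns _ _ h) with ⟨r, hr, hrk⟩
      exact absurd (hrk ▸ hgt r hr) (lt_irrefl _)

-- on a key-sorted pair list, the run at key k carries the sorted titles of the k-filtered list
theorem mem_starsRuns_of_mem_fst (l : List (String × String))
    (hl : l.Pairwise (fun a b => a.1 ≤ b.1)) (k : String) (hk : k ∈ l.map Prod.fst) :
    (k, PySem.List.sorted ((l.filter (fun q => q.1 == k)).map Prod.snd) (fun x => x) false)
      ∈ starsRuns l := by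
  induction l using starsRuns.induct with
  | case1 => simp at hk
  | case2 q rest ih =>
      have hgt : ∀ r ∈ rest.dropWhile (fun r => r.1 == q.1), q.1 < r.1 :=
        dropWhile_keys_gt q.1 rest hl.of_cons (fun r hr => (List.pairwise_cons.mp hl).1 r hr)
      have hdrop : (rest.dropWhile (fun r => r.1 == q.1)).Pairwise (fun a b => a.1 ≤ b.1) :=
        hl.of_cons.sublist (List.dropWhile_sublist _)
      rw [starsRuns]
      by_cases hq : k = q.1
      · rw [hq]
        -- the filtered list is exactly the head run
        have hfil : (q :: rest).filter (fun r => r.1 == q.1) =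
            q :: rest.takeWhile (fun r => r.1 == q.1) := by
          rw [List.filter_cons_of_pos (by simp)]
          congr 1
          conv_lhs => rw [← List.takeWhile_append_dropWhile (p := fun r => r.1 == q.1) (l := rest)]
          rw [List.filter_append,
            List.filter_eq_self.mpr (fun a ha => List.mem_takeWhile_imp (p := fun r : String × String => r.1 == q.1) ha),
            List.filter_eq_nil_iff.mpr (fun a ha => by simpa using ne_of_gt (hgt a ha)),
            List.append_nil]
        rw [hfil]
        simp
      · -- k lives strictly after the head run
        have hkrest : k ∈ (rest.dropWhile (fun r => r.1 == q.1)).map Prod.fst := by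
          simp only [List.map_cons, List.mem_cons] at hk
          rcases hk with rfl | hk
          · exact absurd rfl hq
          · rcases List.mem_map.mp hk with ⟨r, hr, rfl⟩
            conv at hr => rw [← List.takeWhile_append_dropWhile (p := fun r => r.1 == q.1) (l := rest)]
            rcases List.mem_append.mp hr with h | h
            · exact absurd (by simpa using List.mem_takeWhile_imp h) hq
            · exact List.mem_map_of_mem h
        have hfil : (q :: rest).filter (fun r => r.1 == k) =
            (rest.dropWhile (fun r => r.1 == q.1)).filter (fun r => r.1 == k) := by
          rw [List.filter_cons_of_neg (by simpa using fun e => hq e.symm)]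
          conv_lhs => rw [← List.takeWhile_append_dropWhile (p := fun r => r.1 == q.1) (l := rest)]
          rw [List.filter_append, List.filter_eq_nil_iff.mpr
            (fun a ha => by
              have := List.mem_takeWhile_imp ha
              simp only [beq_iff_eq] at this ⊢
              exact fun e => hq (e ▸ this)), List.nil_append]
        rw [hfil]
        exact List.mem_cons_of_mem _ (ih hdrop hkrest)

-- ===== VERDICT (by name: the statement is the Claim_ definition above) =====

theorem stars_spec : Claim_equal_stars := by
  intro movies tvshows _
  unfold Spec_stars
  rw [stars_eq_canon]
  unfold stars_alt
  set raw := movies.flatMap (fun e => e.2.map (fun p => (p, e.1)))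
             ++ tvshows.flatMap (fun e => e.2.map (fun p => (p, e.1))) with hraw
  set s := PySem.List.sorted raw Prod.fst false with hs
  have hsp : s.Pairwise (fun a b => a.1 ≤ b.1) := PySem.List.sorted_pairwise raw Prod.fst
  have hperm : s.Perm raw := PySem.List.sorted_perm raw Prod.fst false
  have hitems : (PySem.Dict.ofList (starsRuns s)).items = starsRuns s := by
    have := PySem.Dict.items_foldl_insert_fresh (l := starsRuns s) (k := Prod.fst) (v := Prod.snd)
      (d := (PySem.Dict.empty : PySem.Dict String (List String)))
      (by intro a _; simp [PySem.Dict.contains_empty]) (nodup_fst_starsRuns s hsp)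
    simpa [PySem.Dict.ofList, PySem.Dict.update, PySem.Dict.empty] using this
  refine List.map_congr_left (fun k hk => ?_)
  have hkraw : k ∈ raw.map Prod.fst := (PySem.List.mem_dedup _ _).mp hk
  have hks : k ∈ s.map Prod.fst := ((hperm.map Prod.fst).mem_iff).mpr hkraw
  have hmem := mem_starsRuns_of_mem_fst s hsp k hks
  have hkeysnd : (PySem.Dict.ofList (starsRuns s)).keys.Nodup := by
    simpa [PySem.Dict.keys, hitems] using nodup_fst_starsRuns s hsp
  rw [PySem.Dict.getD_of_mem_items _ (by rw [hitems]; exact hmem) hkeysnd]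
  have : ((s.filter (fun q => q.1 == k)).map Prod.snd).Perm
      ((raw.filter (fun q => q.1 == k)).map Prod.snd) :=
    (hperm.filter _).map _
  rw [PySem.List.sorted_eq_sorted_of_perm _ _ (fun x => x) (fun _ _ h => h) this]
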